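-- pv_equiv track=rewrite | github.com/torpit85/tctop40search | app.py | nearest_chart_date
-- ===== SOURCE A (Python) =====
-- def nearest_chart_date(selected_date: str, available_dates: list[str]) -> tuple[str | None, bool]:
--     if not available_dates:
--         return None, False
--     ordered = sorted(available_dates)
--     if selected_date in set(ordered):
--         return selected_date, False
--     prior = [d for d in ordered if d <= selected_date]
--     if prior:
--         return prior[-1], True
--     return ordered[0], True
-- ===== SOURCE B (Python) =====
-- def nearest_chart_date(selected_date: str, available_dates: list[str]) -> tuple[str | None, bool]:
--     found = False
--     best_le = None
--     overall_min = None
--     for d in available_dates: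
--         if d == selected_date:
--             found = True
--         if d <= selected_date and (best_le is None or best_le < d):
--             best_le = d
--         if overall_min is None or d < overall_min:
--             overall_min = d
--     if overall_min is None:
--         return None, False
--     if found:
--         return selected_date, False
--     if best_le is not None:
--         return best_le, True
--     return overall_min, True
-- ===== Notes on version B (the rewrite author's own statement) =====
-- stated objective: faster
-- what changed: Replaced sort + set + filter-and-take-last (O(n log n), three passes over a sorted copy) by one linear fold that tracks whether the selected date is present, the maximum available date <= selected, and the overall minimum.
import Mathlib
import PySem

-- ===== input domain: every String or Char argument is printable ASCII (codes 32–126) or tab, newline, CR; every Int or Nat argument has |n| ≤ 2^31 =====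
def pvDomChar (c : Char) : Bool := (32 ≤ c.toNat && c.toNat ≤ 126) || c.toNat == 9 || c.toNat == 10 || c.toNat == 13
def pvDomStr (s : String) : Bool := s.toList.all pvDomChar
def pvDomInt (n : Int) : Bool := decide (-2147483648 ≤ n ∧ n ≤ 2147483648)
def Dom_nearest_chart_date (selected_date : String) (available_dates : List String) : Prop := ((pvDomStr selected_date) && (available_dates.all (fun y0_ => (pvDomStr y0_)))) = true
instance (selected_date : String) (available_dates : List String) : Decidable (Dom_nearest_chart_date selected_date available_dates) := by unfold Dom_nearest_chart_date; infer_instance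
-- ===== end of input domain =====

-- B replaces A's sort-then-filter (O(n log n)) by one linear pass tracking presence, the max date ≤ selected and the global min; objective: faster (asymptotic).


-- ===== PORT A =====
def nearest_chart_date (selected_date : String) (available_dates : List String) : Option String × Bool :=
  if available_dates = [] then (none, false)
  else
    let ordered := PySem.List.sorted available_dates (fun x => x) false
    if selected_date ∈ PySem.Set.ofList ordered then (some selected_date, false)
    else
      let prior := ordered.filter (fun d => decide (d ≤ selected_date))
      if prior ≠ [] then (PySem.List.pyGet? prior (-1), true)
      else (PySem.List.pyGet? ordered 0, true)

-- ===== PORT B =====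
-- one iteration of B's single loop: state = (found, best_le, overall_min)
def ncdStep (selected_date : String) (st : Bool × Option String × Option String) (d : String) : Bool × Option String × Option String :=
  let found := if d == selected_date then true else st.1
  let bestLe := if d ≤ selected_date then (match st.2.1 with | none => some d | some b => if b < d then some d else st.2.1) else st.2.1
  let mn := match st.2.2 with | none => some d | some m => if d < m then some d else st.2.2
  (found, bestLe, mn)

def nearest_chart_date_alt (selected_date : String) (available_dates : List String) : Option String × Bool :=
  let st := available_dates.foldl (ncdStep selected_date) (false, none, none)
  match st.2.2 with
  | none => (none, false)
  | some mn =>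
    if st.1 then (some selected_date, false)
    else
      match st.2.1 with
      | some b => (some b, true)
      | none => (some mn, true)

-- ===== PRECONDITION & SPEC =====
def Spec_nearest_chart_date (selected_date : String) (available_dates : List String) (out : Option String × Bool) : Prop := out = nearest_chart_date_alt selected_date available_dates
instance (selected_date : String) (available_dates : List String) (out : Option String × Bool) : Decidable (Spec_nearest_chart_date selected_date available_dates out) := by unfold Spec_nearest_chart_date; infer_instance

-- ===== CLAIM (what is proved, stated in full; the proofs are below) =====
def Claim_equal_nearest_chart_date : Prop := ∀ (selected_date : String) (available_dates : List String), Dom_nearest_chart_date selected_date available_dates → Spec_nearest_chart_date selected_date available_dates (nearest_chart_date selected_date available_dates)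

-- ===== LEMMAS AND PROOFS =====

-- the three state components of B's loop evolve independently
lemma ncd_fold_split (s : String) (xs : List String) (f : Bool) (b m : Option String) :
    xs.foldl (ncdStep s) (f, b, m) =
      (xs.foldl (fun f d => if d == s then true else f) f,
       xs.foldl (fun b d => if d ≤ s then (match b with | none => some d | some bb => if bb < d then some d else b) else b) b,
       xs.foldl (fun m d => match m with | none => some d | some mm => if d < mm then some d else m) m) := by
  induction xs generalizing f b m with
  | nil => rfl
  | cons x t ih => simp only [List.foldl_cons, ncdStep, ih]

lemma ncd_found (s : String) (xs : List String) (f : Bool) :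
    xs.foldl (fun f d => if d == s then true else f) f = (f || xs.any (· == s)) :=
  PySem.List.foldl_if_true_eq (· == s) xs f

lemma ncd_best_none (s : String) (xs : List String) (b : Option String) :
    xs.foldl (fun b d => if d ≤ s then (match b with | none => some d | some bb => if bb < d then some d else b) else b) b = none ↔
      b = none ∧ ∀ d ∈ xs, ¬ d ≤ s := by
  induction xs generalizing b with
  | nil => simp
  | cons x t ih =>
    simp only [List.foldl_cons, ih, List.mem_cons]
    by_cases hx : x ≤ s
    · simp only [if_pos hx]
      constructor
      · rintro ⟨h1, -⟩
        rcases b with _ | bb <;> dsimp only at h1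
        · exact absurd h1 (by simp)
        · split_ifs at h1
      · rintro ⟨-, hall⟩
        exact absurd hx (hall x (Or.inl rfl))
    · simp only [if_neg hx]
      constructor
      · rintro ⟨h1, h2⟩
        exact ⟨h1, fun d hd => hd.elim (fun e => e ▸ hx) (h2 d)⟩
      · rintro ⟨h1, h2⟩
        exact ⟨h1, fun d hd => h2 d (Or.inr hd)⟩

lemma ncd_best_spec (s : String) (xs : List String) (b : Option String) (x : String)
    (h : xs.foldl (fun b d => if d ≤ s then (match b with | none => some d | some bb => if bb < d then some d else b) else b) b = some x) :
    (b = some x ∨ (x ∈ xs ∧ x ≤ s)) ∧ (∀ y, b = some y → y ≤ x) ∧ (∀ y ∈ xs, y ≤ s → y ≤ x) := by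
  induction xs generalizing b with
  | nil =>
    simp only [List.foldl_nil] at h
    exact ⟨Or.inl h, fun y hy => by rw [h] at hy; exact le_of_eq (Option.some.injEq .. ▸ hy ▸ rfl), by simp⟩
  | cons z t ih =>
    simp only [List.foldl_cons] at h
    by_cases hz : z ≤ s
    · rw [if_pos hz] at h
      rcases b with _ | bb
      all_goals dsimp only at h
      · obtain ⟨hmem, hub, hall⟩ := ih _ h
        refine ⟨?_, by simp, fun y hy hys => ?_⟩
        · rcases hmem with hzx | hx
          · exact Or.inr ⟨by injection hzx with e; exact e ▸ List.mem_cons_self, by injection hzx with e; exact e ▸ hz⟩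
          · exact Or.inr ⟨List.mem_cons_of_mem z hx.1, hx.2⟩
        · rcases List.mem_cons.mp hy with rfl | hy
          · exact hub y rfl
          · exact hall y hy hys
      · by_cases hlt : bb < z
        · rw [if_pos hlt] at h
          obtain ⟨hmem, hub, hall⟩ := ih _ h
          have hzx : z ≤ x := hub z rfl
          refine ⟨?_, fun y hy => ?_, fun y hy hys => ?_⟩
          · rcases hmem with hzx' | hx
            · exact Or.inr ⟨by injection hzx' with e; exact e ▸ List.mem_cons_self, by injection hzx' with e; exact e ▸ hz⟩
            · exact Or.inr ⟨List.mem_cons_of_mem z hx.1, hx.2⟩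
          · injection hy with e; exact le_trans (le_of_lt (e ▸ hlt)) hzx
          · rcases List.mem_cons.mp hy with rfl | hy
            · exact hzx
            · exact hall y hy hys
        · rw [if_neg hlt] at h
          obtain ⟨hmem, hub, hall⟩ := ih _ h
          refine ⟨?_, hub, fun y hy hys => ?_⟩
          · rcases hmem with hb | hx
            · exact Or.inl hb
            · exact Or.inr ⟨List.mem_cons_of_mem z hx.1, hx.2⟩
          · rcases List.mem_cons.mp hy with rfl | hy
            · exact le_trans (le_of_not_gt hlt) (hub bb rfl)
            · exact hall y hy hys
    · rw [if_neg hz] at h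
      obtain ⟨hmem, hub, hall⟩ := ih _ h
      refine ⟨?_, hub, fun y hy hys => ?_⟩
      · rcases hmem with hb | hx
        · exact Or.inl hb
        · exact Or.inr ⟨List.mem_cons_of_mem z hx.1, hx.2⟩
      · rcases List.mem_cons.mp hy with rfl | hy
        · exact absurd hys hz
        · exact hall y hy hys

lemma ncd_min_none (xs : List String) (m : Option String) :
    xs.foldl (fun m d => match m with | none => some d | some mm => if d < mm then some d else m) m = none ↔
      m = none ∧ xs = [] := by
  induction xs generalizing m with
  | nil => simp
  | cons x t ih =>
    simp only [List.foldl_cons, ih]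
    rcases m with _ | mm
    · simp
    · simp only [reduceCtorEq, false_and, iff_false]
      split_ifs <;> simp

lemma ncd_min_spec (xs : List String) (m : Option String) (x : String)
    (h : xs.foldl (fun m d => match m with | none => some d | some mm => if d < mm then some d else m) m = some x) :
    (m = some x ∨ x ∈ xs) ∧ (∀ y, m = some y → x ≤ y) ∧ (∀ y ∈ xs, x ≤ y) := by
  induction xs generalizing m with
  | nil =>
    simp only [List.foldl_nil] at h
    exact ⟨Or.inl h, fun y hy => by rw [h] at hy; exact le_of_eq (Option.some.injEq .. ▸ hy ▸ rfl), by simp⟩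
  | cons z t ih =>
    simp only [List.foldl_cons] at h
    rcases m with _ | mm
    all_goals dsimp only at h
    · obtain ⟨hmem, hlb, hall⟩ := ih _ h
      have hxz : x ≤ z := by
        rcases hmem with hz | hx
        · injection hz with e; exact e ▸ le_refl _
        · exact hlb z rfl |>.trans (le_refl _)
      refine ⟨?_, by simp, fun y hy => ?_⟩
      · rcases hmem with hz | hx
        · exact Or.inr (by injection hz with e; exact e ▸ List.mem_cons_self)
        · exact Or.inr (List.mem_cons_of_mem z hx)
      · rcases List.mem_cons.mp hy with rfl | hy
        · exact hxz
        · exact hall y hy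
    · by_cases hlt : z < mm
      · rw [if_pos hlt] at h
        obtain ⟨hmem, hlb, hall⟩ := ih _ h
        have hxz : x ≤ z := by
          rcases hmem with hz | hx
          · injection hz with e; exact e ▸ le_refl _
          · exact hlb z rfl
        refine ⟨?_, fun y hy => ?_, fun y hy => ?_⟩
        · rcases hmem with hz | hx
          · exact Or.inr (by injection hz with e; exact e ▸ List.mem_cons_self)
          · exact Or.inr (List.mem_cons_of_mem z hx)
        · injection hy with e; exact e ▸ le_trans hxz (le_of_lt hlt)
        · rcases List.mem_cons.mp hy with rfl | hy
          · exact hxz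
          · exact hall y hy
      · rw [if_neg hlt] at h
        obtain ⟨hmem, hlb, hall⟩ := ih _ h
        refine ⟨hmem.imp id (List.mem_cons_of_mem z), hlb, fun y hy => ?_⟩
        rcases List.mem_cons.mp hy with rfl | hy
        · exact le_trans (hlb mm rfl) (le_of_not_gt hlt)
        · exact hall y hy

-- last element of a ≤-sorted list is an upper bound
lemma pairwise_le_getLast (l : List String) (h : l.Pairwise (fun a b : String => a ≤ b)) (hne : l ≠ []) :
    ∀ y ∈ l, y ≤ l.getLast hne := by
  induction l with
  | nil => simp
  | cons x t ih =>
    intro y hy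
    rcases t with _ | ⟨z, t'⟩
    · simp at hy; subst hy; simp
    · have hp := List.pairwise_cons.mp h
      rcases List.mem_cons.mp hy with rfl | hy
      · exact le_trans (hp.1 z (by simp)) (ih hp.2 (by simp) z (by simp))
      · exact ih hp.2 (by simp) y hy

-- A = B, one input at a time
lemma ncd_agree (s : String) (avail : List String) :
    nearest_chart_date s avail = nearest_chart_date_alt s avail := by
  by_cases hnil : avail = []
  · subst hnil; rfl
  unfold nearest_chart_date nearest_chart_date_alt
  rw [ncd_fold_split, ncd_found]
  simp only [if_neg hnil, Bool.false_or]
  set ordered := PySem.List.sorted avail (fun x => x) false with hord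
  have hmemord : ∀ y, y ∈ ordered ↔ y ∈ avail := fun y => PySem.List.mem_sorted avail (fun x => x) false y
  -- the global minimum accumulator is some mn, the minimum of avail
  obtain ⟨mn, hmn⟩ : ∃ mn, avail.foldl (fun m d => match m with | none => some d | some mm => if d < mm then some d else m) (none : Option String) = some mn := by
    rcases h : avail.foldl (fun m d => match m with | none => some d | some mm => if d < mm then some d else m) (none : Option String) with _ | mn
    · exact absurd ((ncd_min_none avail none).mp h).2 hnil
    · exact ⟨mn, h⟩
  obtain ⟨hmnmem, -, hmnlb⟩ := ncd_min_spec avail none mn hmn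
  replace hmnmem : mn ∈ avail := hmnmem.resolve_left (by simp)
  rw [hmn]
  by_cases hin : s ∈ avail
  · -- selected date is available: both return (some s, false)
    have h1 : s ∈ PySem.Set.ofList ordered := by
      rw [PySem.Set.mem_ofList, hmemord]; exact hin
    have h2 : avail.any (· == s) = true := by
      simp only [List.any_eq_true, beq_iff_eq]; exact ⟨s, hin, rfl⟩
    rw [if_pos h1, h2]
    rfl
  · have h1 : s ∉ PySem.Set.ofList ordered := by
      rw [PySem.Set.mem_ofList, hmemord]; exact hin
    have h2 : avail.any (· == s) = false := by
      simp only [List.any_eq_false, beq_iff_eq]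
      intro y hy he; exact hin (he ▸ hy)
    rw [if_neg h1, h2]
    simp only [Bool.false_eq_true, if_false]
    set prior := ordered.filter (fun d => decide (d ≤ s)) with hprior
    by_cases hex : ∃ d ∈ avail, d ≤ s
    · -- some date ≤ selected exists: both return its maximum
      obtain ⟨d, hd, hds⟩ := hex
      have hpne : prior ≠ [] := by
        have : d ∈ prior := List.mem_filter.mpr ⟨(hmemord d).mpr hd, by simpa using hds⟩
        intro e; rw [e] at this; exact absurd this (List.not_mem_nil)
      obtain ⟨x, hx⟩ : ∃ x, avail.foldl (fun b d => if d ≤ s then (match b with | none => some d | some bb => if bb < d then some d else b) else b) (none : Option String) = some x := by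
        rcases h : avail.foldl (fun b d => if d ≤ s then (match b with | none => some d | some bb => if bb < d then some d else b) else b) (none : Option String) with _ | x
        · exact absurd hds (((ncd_best_none s avail none).mp h).2 d hd)
        · exact ⟨x, h⟩
      obtain ⟨hxmem, -, hxub⟩ := ncd_best_spec s avail none x hx
      replace hxmem : x ∈ avail ∧ x ≤ s := hxmem.resolve_left (by simp)
      rw [if_pos hpne, hx, PySem.List.pyGet?_neg_one, List.getLast?_eq_some_getLast hpne]
      have hgmem := List.getLast_mem hpne
      have hgf := List.mem_filter.mp hgmem
      have hgub : ∀ y ∈ prior, y ≤ prior.getLast hpne :=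
        pairwise_le_getLast prior ((PySem.List.sorted_pairwise (key := fun x => x) (xs := avail)).filter _) hpne
      have hxg : x = prior.getLast hpne := by
        refine le_antisymm ?_ ?_
        · exact hgub x (List.mem_filter.mpr ⟨(hmemord x).mpr hxmem.1, by simpa using hxmem.2⟩)
        · exact hxub _ ((hmemord _).mp hgf.1) (by simpa using hgf.2)
      rw [hxg]
    · -- no date ≤ selected: both return the overall minimum
      push Not at hex
      have hpnil : prior = [] := by
        rw [hprior, List.filter_eq_nil_iff]
        intro a ha; simpa using hex a ((hmemord a).mp ha)
      have hbnone : avail.foldl (fun b d => if d ≤ s then (match b with | none => some d | some bb => if bb < d then some d else b) else b) (none : Option String) = none :=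
        (ncd_best_none s avail none).mpr ⟨rfl, fun d hd => by simpa using hex d hd⟩
      rw [if_neg (by simp [hpnil]), hbnone, PySem.List.pyGet?_zero]
      have hone : ordered ≠ [] := fun e => hnil ((PySem.List.sorted_eq_nil_iff avail (fun x => x) false).mp e)
      obtain ⟨m, t, hmt⟩ := List.exists_cons_of_ne_nil hone
      have hhd : ∀ y ∈ avail, m ≤ y := PySem.List.key_head_sorted_le avail (fun x => x) (hord ▸ hmt)
      have hmavail : m ∈ avail := (hmemord m).mp (hmt ▸ List.mem_cons_self)
      have hmmn : m = mn := le_antisymm (hhd mn hmnmem) (hmnlb m hmavail)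
      rw [hmt]
      simp [hmmn]

-- ===== VERDICT (by name: the statement is the Claim_ definition above) =====
theorem nearest_chart_date_spec : Claim_equal_nearest_chart_date := by
  intro s avail _
  exact ncd_agree s avail
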